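-- pv_equiv track=rewrite | github.com/dshomshonov0901/Dedup-dshomshonov0901 | shomshonov_deduper.py | fivePrimeFinder
-- ===== SOURCE A (Python) =====
-- def fivePrimeFinder(pos: int, cigar: str, reverse: bool) -> int:
--     """Return 5' coordinate accounting for strand and CIGAR."""
--     cigar_ops = []
--     num = ''
--     for char in cigar:
--         if char.isdigit():
--             num += char
--         else:
--             cigar_ops.append((int(num), char))
--             num = ''
--
--     if not reverse:
--         return pos
--
--     aligned_len = 0
--     soft_clip_end = 0
--     for i, (length, op) in enumerate(cigar_ops):
--         if op in ('M', 'D', 'N'):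
--             aligned_len += length
--         elif op == 'S' and i == len(cigar_ops) - 1:
--             soft_clip_end = length
--     return pos + aligned_len + soft_clip_end - 1
-- ===== SOURCE B (Python) =====
-- def fivePrimeFinder(pos: int, cigar: str, reverse: bool) -> int:
--     """Return 5' coordinate accounting for strand and CIGAR (single streaming pass)."""
--     num = ''
--     aligned = 0
--     last = None
--     for char in cigar:
--         if char.isdigit():
--             num += char
--         else:
--             n = int(num)
--             num = ''
--             if char in ('M', 'D', 'N'):
--                 aligned += n
--             last = (n, char)
--     if not reverse:
--         return pos
--     tail = last[0] if last is not None and last[1] == 'S' else 0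
--     return pos + aligned + tail - 1
-- ===== Notes on version B (the rewrite author's own statement) =====
-- stated objective: simpler
-- what changed: B fuses A's two phases (build a token list, then an enumerate loop that needs the list length to detect the final token) into one streaming pass that keeps only a running aligned length and the latest token, so no token list is ever materialised.
import Mathlib
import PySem

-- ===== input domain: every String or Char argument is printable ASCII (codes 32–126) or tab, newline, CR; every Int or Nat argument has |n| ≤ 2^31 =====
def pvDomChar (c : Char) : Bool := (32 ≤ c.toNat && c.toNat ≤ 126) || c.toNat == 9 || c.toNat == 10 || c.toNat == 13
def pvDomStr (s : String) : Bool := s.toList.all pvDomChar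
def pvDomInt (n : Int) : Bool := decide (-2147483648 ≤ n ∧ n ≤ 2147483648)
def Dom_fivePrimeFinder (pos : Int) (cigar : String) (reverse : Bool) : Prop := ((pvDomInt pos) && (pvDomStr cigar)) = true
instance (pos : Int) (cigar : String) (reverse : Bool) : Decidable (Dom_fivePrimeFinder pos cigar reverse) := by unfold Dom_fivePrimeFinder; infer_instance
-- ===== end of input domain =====

-- B fuses A's two passes (token list + enumerate loop) into one streaming pass keeping only a
-- running aligned length and the latest token; same value, simpler, O(1) extra space.

-- ===== PORT A =====
-- A's first loop: build cigar_ops (num is the pending digit string; int('') is ValueError,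
-- modelled by .getD 0 — such inputs are excluded by Pre_fivePrimeFinder).
def fpfParse (num : List Char) (ops : List (Int × Char)) : List Char → List Char × List (Int × Char)
  | [] => (num, ops)
  | c :: rest =>
    if PySem.Chars.isdigit c then fpfParse (num ++ [c]) ops rest
    else fpfParse [] (ops ++ [((PySem.Int.ofChars? num).getD 0, c)]) rest

-- A's second loop: for i,(length,op) in enumerate(cigar_ops), carried as an index recursion.
def fpfLoop (n : Nat) (i : Nat) (aligned soft : Int) : List (Int × Char) → Int × Int
  | [] => (aligned, soft)
  | (len, op) :: rest =>
    if op = 'M' ∨ op = 'D' ∨ op = 'N' then fpfLoop n (i+1) (aligned + len) soft rest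
    else if op = 'S' ∧ i = n - 1 then fpfLoop n (i+1) aligned len rest
    else fpfLoop n (i+1) aligned soft rest

def fivePrimeFinder (pos : Int) (cigar : String) (reverse : Bool) : Int :=
  let ops := (fpfParse [] [] cigar.toList).2
  if reverse = false then pos
  else
    let r := fpfLoop ops.length 0 0 0 ops
    pos + r.1 + r.2 - 1

-- ===== PORT B =====
-- B's single pass: aligned length and latest token, no token list.
def fpfScan (num : List Char) (aligned : Int) (last : Option (Int × Char)) :
    List Char → Int × Option (Int × Char)
  | [] => (aligned, last)
  | c :: rest =>
    if PySem.Chars.isdigit c then fpfScan (num ++ [c]) aligned last rest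
    else
      fpfScan [] (if c = 'M' ∨ c = 'D' ∨ c = 'N' then aligned + (PySem.Int.ofChars? num).getD 0 else aligned)
        (some ((PySem.Int.ofChars? num).getD 0, c)) rest

def fivePrimeFinder_alt (pos : Int) (cigar : String) (reverse : Bool) : Int :=
  let r := fpfScan [] 0 none cigar.toList
  if reverse = false then pos
  else
    let tail : Int := match r.2 with
      | some (n, op) => if op = 'S' then n else 0
      | none => 0
    pos + r.1 + tail - 1

-- ===== PRECONDITION & SPEC =====
-- Pre_ excludes exactly the malformed CIGARs on which Python A raises ValueError (int('')):
-- an op character not immediately preceded by a digit.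
def Pre_fivePrimeFinder (pos : Int) (cigar : String) (reverse : Bool) : Prop :=
  ∀ i, i < cigar.toList.length →
    PySem.Chars.isdigit (cigar.toList.getD i ' ') = false →
    0 < i ∧ PySem.Chars.isdigit (cigar.toList.getD (i - 1) ' ') = true
instance (pos : Int) (cigar : String) (reverse : Bool) : Decidable (Pre_fivePrimeFinder pos cigar reverse) := by
  unfold Pre_fivePrimeFinder; infer_instance

def pvWitness_fivePrimeFinder : Int × String × Bool := (100, "10M2S", true)

def Spec_fivePrimeFinder (pos : Int) (cigar : String) (reverse : Bool) (out : Int) : Prop := out = fivePrimeFinder_alt pos cigar reverse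
instance (pos : Int) (cigar : String) (reverse : Bool) (out : Int) : Decidable (Spec_fivePrimeFinder pos cigar reverse out) := by unfold Spec_fivePrimeFinder; infer_instance

-- ===== CLAIM (what is proved, stated in full; the proofs are below) =====
def Claim_equal_fivePrimeFinder : Prop := ∀ (pos : Int) (cigar : String) (reverse : Bool), Dom_fivePrimeFinder pos cigar reverse → Pre_fivePrimeFinder pos cigar reverse → Spec_fivePrimeFinder pos cigar reverse (fivePrimeFinder pos cigar reverse)

-- ===== LEMMAS AND PROOFS =====

def fpfSumMDN : List (Int × Char) → Int
  | [] => 0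
  | (len, op) :: rest => (if op = 'M' ∨ op = 'D' ∨ op = 'N' then len else 0) + fpfSumMDN rest

def fpfLastOr (l : List (Int × Char)) (d : Option (Int × Char)) : Option (Int × Char) :=
  match l.getLast? with
  | some x => some x
  | none => d

theorem fpfLastOr_cons (x : Int × Char) (l : List (Int × Char)) (d : Option (Int × Char)) :
    fpfLastOr (x :: l) d = fpfLastOr l (some x) := by
  cases l <;> simp [fpfLastOr, List.getLast?]

theorem fpfParse_acc (cs : List Char) : ∀ (num : List Char) (ops : List (Int × Char)),
    fpfParse num ops cs = ((fpfParse num [] cs).1, ops ++ (fpfParse num [] cs).2) := by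
  induction cs with
  | nil => intro num ops; simp [fpfParse]
  | cons c rest ih =>
    intro num ops
    by_cases h : PySem.Chars.isdigit c = true
    · have e : ∀ o, fpfParse num o (c :: rest) = fpfParse (num ++ [c]) o rest := by
        intro o; simp [fpfParse, h]
      rw [e, e]; exact ih (num ++ [c]) ops
    · simp only [fpfParse, h]
      rw [ih [] (ops ++ _), ih [] ([] ++ _)]
      simp

theorem fpfScan_eq (cs : List Char) : ∀ (num : List Char) (a : Int) (last : Option (Int × Char)),
    fpfScan num a last cs =
      (a + fpfSumMDN (fpfParse num [] cs).2, fpfLastOr (fpfParse num [] cs).2 last) := by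
  induction cs with
  | nil => intro num a last; simp [fpfScan, fpfParse, fpfSumMDN, fpfLastOr]
  | cons c rest ih =>
    intro num a last
    by_cases h : PySem.Chars.isdigit c = true
    · simpa [fpfScan, fpfParse, h] using ih (num ++ [c]) a last
    · simp only [fpfScan, fpfParse, h, Bool.false_eq_true, if_false, List.nil_append]
      rw [ih, fpfParse_acc rest [] [((PySem.Int.ofChars? num).getD 0, c)]]
      simp only [List.singleton_append, fpfSumMDN, fpfLastOr_cons, Prod.mk.injEq]
      refine ⟨?_, trivial⟩
      split_ifs <;> ring
  
theorem fpfLoop_eq (l : List (Int × Char)) : ∀ (n k : Nat) (a s : Int),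
    k + l.length = n →
    fpfLoop n k a s l =
      (a + fpfSumMDN l,
       match l.getLast? with
       | some (len, op) => if op = 'S' then len else s
       | none => s) := by
  induction l with
  | nil => intro n k a s _; simp [fpfLoop, fpfSumMDN]
  | cons x rest ih =>
    intro n k a s hn
    obtain ⟨len, op⟩ := x
    have hlen : k + 1 + rest.length = n := by simp at hn; omega
    rw [fpfLoop]
    split_ifs with h1 h2
    · rw [ih n (k+1) (a+len) s hlen]
      cases rest with
      | nil =>
        have hS : op ≠ 'S' := by rcases h1 with h | h | h <;> simp [h]
        simp [fpfSumMDN, if_pos h1, hS]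
      | cons y r =>
        simp [fpfSumMDN, if_pos h1, List.getLast?_cons_cons, add_assoc]
    · obtain ⟨hS, hk⟩ := h2
      have hr : rest = [] := by
        cases rest with
        | nil => rfl
        | cons y r => exfalso; simp at hlen; omega
      subst hr
      rw [ih n (k+1) a len hlen]
      simp [fpfSumMDN, hS]
    · rw [ih n (k+1) a s hlen]
      cases rest with
      | nil =>
        have hk : k = n - 1 := by simp at hn; omega
        have hS : op ≠ 'S' := fun hh => h2 ⟨hh, hk⟩
        simp [fpfSumMDN, if_neg h1, hS]
      | cons y r =>
        simp [fpfSumMDN, if_neg h1, List.getLast?_cons_cons]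

-- ===== VERDICT (by name: the statement is the Claim_ definition above) =====
theorem fivePrimeFinder_spec : Claim_equal_fivePrimeFinder := by
  intro pos cigar reverse _ _
  unfold Spec_fivePrimeFinder fivePrimeFinder fivePrimeFinder_alt
  cases reverse with
  | false => simp
  | true =>
    simp only [Bool.true_eq_false, if_false]
    rw [fpfScan_eq, fpfLoop_eq _ _ 0 0 0 (by simp)]
    unfold fpfLastOr
    cases h : ((fpfParse [] [] cigar.toList).2).getLast? with
    | none => simp
    | some x => obtain ⟨len, op⟩ := x; simp
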